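-- pv_equiv track=rewrite | github.com/galcesana/CBIO_Hackathon | newick_format_to_node_tree_1.py | do_and
-- ===== SOURCE A (Python) =====
-- def do_and(result, thr=0.5):
--     res_vec = []
--     n = len(list(result.values())[0])
--     for i in range(n):
--         res = 1
--         for vec in result.values():
--             if vec[i] == 0:
--                 res = 0
--                 break
--         res_vec.append(res)
--     return res_vec
-- ===== SOURCE B (Python) =====
-- def do_and(result, thr=0.5):
--     vecs = list(result.values())
--     n = len(vecs[0])
--     res_vec = [1] * n
--     for vec in vecs:
--         for i in range(n):
--             if vec[i] == 0:
--                 res_vec[i] = 0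
--     return res_vec
-- ===== Notes on version B (the rewrite author's own statement) =====
-- stated objective: alternative
-- what changed: B swaps the loop nesting: it initializes a [1]*n accumulator once and folds each input vector into it, zeroing positions, instead of computing each output scalar by scanning all vectors with an early break.
-- outside the precondition, e.g. on do_and({'a': [0], 'b': []}, 0): A returns [0], B raises IndexError
import Mathlib
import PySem

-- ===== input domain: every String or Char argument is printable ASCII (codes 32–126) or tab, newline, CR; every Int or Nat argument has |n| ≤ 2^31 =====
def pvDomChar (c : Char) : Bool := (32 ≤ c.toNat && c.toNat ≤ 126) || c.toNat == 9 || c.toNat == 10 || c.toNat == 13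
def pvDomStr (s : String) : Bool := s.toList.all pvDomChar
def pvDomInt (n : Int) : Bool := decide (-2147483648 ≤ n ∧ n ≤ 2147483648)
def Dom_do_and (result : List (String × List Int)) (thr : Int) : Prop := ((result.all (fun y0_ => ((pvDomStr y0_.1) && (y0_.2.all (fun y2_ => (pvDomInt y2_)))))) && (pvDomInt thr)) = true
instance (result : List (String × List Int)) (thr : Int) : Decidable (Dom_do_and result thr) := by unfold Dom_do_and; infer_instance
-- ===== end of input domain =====

-- B swaps the loop nesting: a [1]*n accumulator is folded over the vectors instead of
-- computing each output scalar by scanning all vectors with a break (objective: alternative); thr is unused as in A.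

-- ===== PORT A =====
-- A's inner 'for vec in …: if vec[i] == 0: res = 0; break' loop; indices are nonnegative and
-- in range under Pre_do_and, so List.getD is exact for Python's vec[i] there
def doAndInner : List (List Int) → Nat → Int
  | [], _ => 1
  | v :: rest, i => if v.getD i 1 = 0 then 0 else doAndInner rest i

def do_and (result : List (String × List Int)) (thr : Int) : List Int :=
  let vals := (PySem.Dict.ofList result).values
  let n := (vals.getD 0 []).length
  (List.range n).map (fun i => doAndInner vals i)

-- ===== PORT B =====
-- one step of Source B's outer loop: 'for i in range(n): if vec[i] == 0: res_vec[i] = 0'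
def doAndAltStep (n : Nat) (acc : List Int) (vec : List Int) : List Int :=
  (List.range n).foldl (fun a i => if vec.getD i 1 = 0 then a.set i 0 else a) acc

def do_and_alt (result : List (String × List Int)) (thr : Int) : List Int :=
  let vecs := (PySem.Dict.ofList result).values
  let n := (vecs.getD 0 []).length
  vecs.foldl (doAndAltStep n) (List.replicate n 1)

-- ===== PRECONDITION & SPEC =====
-- Pre_ excludes the empty dict (A raises IndexError on list(result.values())[0]) and ragged
-- dicts where some vector is shorter than the first: there A raises IndexError except when an
-- earlier zero breaks the scan first, a value B's natural loop cannot match (B raises there).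
def Pre_do_and (result : List (String × List Int)) (thr : Int) : Prop :=
  (PySem.Dict.ofList result).values ≠ [] ∧
  ∀ v ∈ (PySem.Dict.ofList result).values,
    (((PySem.Dict.ofList result).values.getD 0 []).length ≤ v.length)
instance (result : List (String × List Int)) (thr : Int) : Decidable (Pre_do_and result thr) := by
  unfold Pre_do_and; infer_instance

def pvWitness_do_and : (List (String × List Int)) × Int := ([("a", [1, 0, 2]), ("b", [3, 1, 0])], 0)

def Spec_do_and (result : List (String × List Int)) (thr : Int) (out : List Int) : Prop := out = do_and_alt result thr
instance (result : List (String × List Int)) (thr : Int) (out : List Int) : Decidable (Spec_do_and result thr out) := by unfold Spec_do_and; infer_instance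

-- ===== CLAIM (what is proved, stated in full; the proofs are below) =====
def Claim_equal_do_and : Prop := ∀ (result : List (String × List Int)) (thr : Int), Dom_do_and result thr → Pre_do_and result thr → Spec_do_and result thr (do_and result thr)

-- ===== LEMMAS AND PROOFS =====

-- A's inner loop returns 0 exactly when some vector reads 0 at index i
theorem doAndInner_eq (vals : List (List Int)) (i : Nat) :
    doAndInner vals i = if ∃ v ∈ vals, v.getD i 1 = 0 then 0 else 1 := by
  induction vals with
  | nil => simp [doAndInner]
  | cons v rest ih =>
    show (if v.getD i 1 = 0 then 0 else doAndInner rest i) = _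
    by_cases hv : v.getD i 1 = 0
    · rw [if_pos hv, if_pos ⟨v, List.mem_cons_self, hv⟩]
    · rw [if_neg hv, ih]
      by_cases hr : ∃ w ∈ rest, w.getD i 1 = 0
      · obtain ⟨w, hw, hp⟩ := hr
        rw [if_pos ⟨w, hw, hp⟩, if_pos ⟨w, List.mem_cons_of_mem _ hw, hp⟩]
      · rw [if_neg hr, if_neg (by
          rintro ⟨w, hw, hp⟩
          rcases List.mem_cons.mp hw with rfl | hw
          exacts [hv hp, hr ⟨w, hw, hp⟩])]

-- B's inner fold (one vector) preserves the accumulator length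
theorem rangeFold_length (vec : List Int) (n : Nat) (acc : List Int) :
    ((List.range n).foldl (fun a i => if vec.getD i 1 = 0 then a.set i 0 else a) acc).length
      = acc.length := by
  induction n generalizing acc with
  | zero => rfl
  | succ m ih =>
    rw [List.range_succ, List.foldl_append, List.foldl_cons, List.foldl_nil]
    split
    · rw [List.length_set, ih]
    · rw [ih]

-- B's inner fold read at index j
theorem doAndAltStep_getD (vec : List Int) (n j : Nat) (acc : List Int) :
    (doAndAltStep n acc vec).getD j 0 =
      if j < n ∧ vec.getD j 1 = 0 then 0 else acc.getD j 0 := by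
  unfold doAndAltStep
  induction n generalizing acc with
  | zero => simp
  | succ n ih =>
    rw [List.range_succ, List.foldl_append, List.foldl_cons, List.foldl_nil]
    by_cases hv : vec.getD n 1 = 0
    · rw [if_pos hv]
      by_cases hjn : j = n
      · subst hjn
        rw [List.getD_eq_getElem?_getD, List.getElem?_set_self',
          if_pos ⟨Nat.lt_succ_self j, hv⟩]
        cases h : ((List.range j).foldl (fun a i => if vec.getD i 1 = 0 then a.set i 0 else a) acc)[j]? <;> simp
      · rw [List.getD_eq_getElem?_getD, List.getElem?_set_ne (fun h => hjn h.symm),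
          ← List.getD_eq_getElem?_getD, ih]
        exact if_congr ⟨fun ⟨h1, h2⟩ => ⟨by omega, h2⟩, fun ⟨h1, h2⟩ => ⟨by omega, h2⟩⟩ rfl rfl
    · rw [if_neg hv, ih]
      by_cases hjn : j = n
      · subst hjn
        rw [if_neg (by omega), if_neg (by rintro ⟨-, h2⟩; exact hv h2)]
      · exact if_congr ⟨fun ⟨h1, h2⟩ => ⟨by omega, h2⟩, fun ⟨h1, h2⟩ => ⟨by omega, h2⟩⟩ rfl rfl

-- B's outer fold read at index j
theorem foldB_getD (n : Nat) (vals : List (List Int)) (acc : List Int) (j : Nat) :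
    (vals.foldl (doAndAltStep n) acc).getD j 0 =
      if ∃ v ∈ vals, j < n ∧ v.getD j 1 = 0 then 0 else acc.getD j 0 := by
  induction vals generalizing acc with
  | nil => simp
  | cons v rest ih =>
    rw [List.foldl_cons, ih]
    by_cases hr : ∃ w ∈ rest, j < n ∧ w.getD j 1 = 0
    · obtain ⟨w, hw, hp⟩ := hr
      rw [if_pos ⟨w, hw, hp⟩, if_pos ⟨w, List.mem_cons_of_mem _ hw, hp⟩]
    · rw [if_neg hr, doAndAltStep_getD]
      by_cases hv : j < n ∧ v.getD j 1 = 0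
      · rw [if_pos hv, if_pos ⟨v, List.mem_cons_self, hv⟩]
      · rw [if_neg hv, if_neg (by
          rintro ⟨w, hw, hp⟩
          rcases List.mem_cons.mp hw with rfl | hw
          exacts [hv hp, hr ⟨w, hw, hp⟩])]

-- B's outer fold preserves the accumulator length
theorem foldB_length (n : Nat) (vals : List (List Int)) (acc : List Int) :
    (vals.foldl (doAndAltStep n) acc).length = acc.length := by
  induction vals generalizing acc with
  | nil => rfl
  | cons v rest ih => rw [List.foldl_cons, ih, doAndAltStep, rangeFold_length]

-- ===== VERDICT (by name: the statement is the Claim_ definition above) =====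
theorem do_and_spec : Claim_equal_do_and := by
  intro result thr _ _
  unfold Spec_do_and do_and do_and_alt
  dsimp only
  generalize (PySem.Dict.ofList result).values = vals
  apply List.ext_getElem
  · simp [foldB_length]
  · intro j hj1 hj2
    simp only [List.length_map, List.length_range] at hj1
    rw [List.getElem_map, List.getElem_range, doAndInner_eq]
    have h2 := foldB_getD ((vals.getD 0 []).length) vals
      (List.replicate ((vals.getD 0 []).length) 1) j
    rw [List.getD_eq_getElem?_getD, List.getElem?_eq_getElem hj2, Option.getD_some] at h2
    rw [h2]
    have hrep : (List.replicate ((vals.getD 0 []).length) (1 : Int)).getD j 0 = 1 := by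
      rw [List.getD_eq_getElem?_getD, List.getElem?_replicate, if_pos hj1]
      rfl
    rw [hrep]
    exact if_congr
      ⟨fun ⟨v, hv, hp⟩ => ⟨v, hv, hj1, hp⟩, fun ⟨v, hv, _, hp⟩ => ⟨v, hv, hp⟩⟩ rfl rfl
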